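-- pv_equiv track=rewrite | github.com/Froldas/TransformerHyphen | src/utils.py | insert_hyphenation
-- ===== SOURCE A (Python) =====
-- def insert_hyphenation(string, bit_list):
--     # Convert the string to a list for easier manipulation
--     string_list = list(string)
--
--     # Iterate over the bit_list and insert '-' where there is a 1
--     hyphens_inserted = 0
--     for index, bit in enumerate(bit_list):
--         if bit == 1:
--             # Insert '-' at the predicted spot
--             string_list.insert(index + hyphens_inserted + 1, '-')
--             hyphens_inserted += 1
--
--     # Convert the list back to a string
--     result_string = ''.join(string_list)
--     return result_string
-- ===== SOURCE B (Python) =====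
-- def insert_hyphenation(string, bit_list):
--     cuts = [i + 1 for i, b in enumerate(bit_list) if b == 1]
--     pieces = []
--     prev = 0
--     for c in cuts:
--         pieces.append(string[prev:c])
--         prev = c
--     pieces.append(string[prev:])
--     return '-'.join(pieces)
-- ===== Notes on version B (the rewrite author's own statement) =====
-- stated objective: alternative
-- what changed: B computes the cut positions from the 1-bits once, slices the original string into segments at those positions, and joins the segments with '-', instead of A's per-bit mid-list insertion into a growing character list with a shifting offset.
import Mathlib
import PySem

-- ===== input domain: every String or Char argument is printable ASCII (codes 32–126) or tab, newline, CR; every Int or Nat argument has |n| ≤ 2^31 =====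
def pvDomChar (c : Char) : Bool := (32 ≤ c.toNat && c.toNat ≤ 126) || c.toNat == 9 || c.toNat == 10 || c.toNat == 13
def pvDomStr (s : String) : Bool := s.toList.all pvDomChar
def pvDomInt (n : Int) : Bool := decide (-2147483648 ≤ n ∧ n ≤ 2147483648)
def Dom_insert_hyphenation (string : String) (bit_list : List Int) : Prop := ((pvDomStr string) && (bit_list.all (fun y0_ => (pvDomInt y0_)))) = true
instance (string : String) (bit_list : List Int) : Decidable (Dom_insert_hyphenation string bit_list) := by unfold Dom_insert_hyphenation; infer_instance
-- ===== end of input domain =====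

-- B cuts the string at the 1-bit positions and joins the segments with '-'
-- (slice-and-join decomposition) instead of A's repeated mid-list insertion.

-- ===== PORT A =====
def insert_hyphenation (string : String) (bit_list : List Int) : String :=
  let string_list := string.toList
  let st :=
    (PySem.List.enumerate bit_list 0).foldl
      (fun (acc : List Char × Int) ib =>
        if ib.2 == 1 then
          (PySem.List.insert acc.1 (ib.1 + acc.2 + 1) '-', acc.2 + 1)
        else acc)
      (string_list, 0)
  String.ofList st.1

-- ===== PORT B =====
def insert_hyphenation_alt (string : String) (bit_list : List Int) : String :=
  let s := string.toList
  let cuts :=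
    (PySem.List.enumerate bit_list 0).filterMap
      (fun ib => if ib.2 == 1 then some (ib.1 + 1) else none)
  let st :=
    cuts.foldl
      (fun (acc : List (List Char) × Int) c =>
        (acc.1 ++ [PySem.List.slice s (some acc.2) (some c)], c))
      ([], 0)
  let pieces := st.1 ++ [PySem.List.slice s (some st.2) none]
  String.ofList (List.intercalate ['-'] pieces)

-- ===== PRECONDITION & SPEC =====
def Spec_insert_hyphenation (string : String) (bit_list : List Int) (out : String) : Prop := out = insert_hyphenation_alt string bit_list
instance (string : String) (bit_list : List Int) (out : String) : Decidable (Spec_insert_hyphenation string bit_list out) := by unfold Spec_insert_hyphenation; infer_instance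

-- ===== CLAIM (what is proved, stated in full; the proofs are below) =====
def Claim_equal_insert_hyphenation : Prop := ∀ (string : String) (bit_list : List Int), Dom_insert_hyphenation string bit_list → Spec_insert_hyphenation string bit_list (insert_hyphenation string bit_list)

-- ===== LEMMAS AND PROOFS =====

-- common recursive characterisation: one char of the string per bit, a '-' after it when the bit is 1
def hyphSpec : List Char → List Int → List Char
  | s, [] => s
  | s, b :: bs => s.take 1 ++ (if b == 1 then ['-'] else []) ++ hyphSpec (s.drop 1) bs

-- inserting past the end appends (Python list.insert clamps)
theorem insert_clamp (xs : List Char) (p : Nat) (v : Char) (h : xs.length < p) :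
    PySem.List.insert xs (p : Int) v = xs ++ [v] := by
  have h1 : min (p : Int) (xs.length : Int) = xs.length := by omega
  have h2 : ¬((p : Int) < 0) := by omega
  simp [PySem.List.insert, PySem.List.sliceIndices, h1, h2]

-- key splitting identity on take/drop
theorem take_split (s : List Char) (prev i : Nat) (h : prev ≤ i) :
    (s.drop prev).take (i + 1 - prev) =
      (s.drop prev).take (i - prev) ++ (s.drop i).take 1 := by
  have h1 : i + 1 - prev = (i - prev) + 1 := by omega
  have h2 : s.drop i = (s.drop prev).drop (i - prev) := by
    rw [List.drop_drop]; congr 1; omega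
  rw [h1, List.take_add, h2]

theorem take_drop_join (s : List Char) (prev i : Nat) (h : prev ≤ i) :
    (s.drop prev).take (i - prev) ++ s.drop i = s.drop prev := by
  have h2 : s.drop i = (s.drop prev).drop (i - prev) := by
    rw [List.drop_drop]; congr 1; omega
  rw [h2, List.take_append_drop]

-- ========== A side ==========

theorem A_loop (bits : List Int) : ∀ (i h : Nat) (emitted rest : List Char),
    emitted.length ≤ i + h → (rest ≠ [] → emitted.length = i + h) →
    ((PySem.List.enumerate bits (i : Int)).foldl
      (fun (acc : List Char × Int) ib =>
        if ib.2 == 1 then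
          (PySem.List.insert acc.1 (ib.1 + acc.2 + 1) '-', acc.2 + 1)
        else acc)
      (emitted ++ rest, (h : Int))).1 = emitted ++ hyphSpec rest bits := by
  induction bits with
  | nil => intro i h emitted rest _ _; simp [PySem.List.enumerate, hyphSpec]
  | cons b bs ih =>
    intro i h emitted rest hle heq
    rw [PySem.List.enumerate_cons, List.foldl_cons]
    by_cases hb : b == 1
    · simp only [hb, if_true]
      cases rest with
      | nil =>
        have hlen : (emitted).length < i + h + 1 := by omega
        have hcast : (i : Int) + (h : Int) + 1 = ((i + h + 1 : Nat) : Int) := by push_cast; ring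
        simp only [List.append_nil] at *
        rw [hcast, insert_clamp emitted (i + h + 1) '-' hlen]
        have hc2 : ((h : Int) + 1) = ((h + 1 : Nat) : Int) := by push_cast; ring
        have hc3 : ((i : Int) + 1) = ((i + 1 : Nat) : Int) := by push_cast; ring
        rw [hc2, hc3]
        have := ih (i + 1) (h + 1) (emitted ++ ['-']) []
          (by simp; omega) (by intro hx; exact absurd rfl hx)
        simp only [List.append_nil] at this
        rw [this]
        simp [hyphSpec, hb]
      | cons c cs =>
        have hlen : emitted.length = i + h := heq (by simp)
        have hcast : (i : Int) + (h : Int) + 1 = ((i + h + 1 : Nat) : Int) := by push_cast; ring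
        rw [hcast, PySem.List.insert_natCast _ (i + h + 1) '-'
              (by simp [List.length_append]; omega)]
        have htake : (emitted ++ c :: cs).take (i + h + 1) = emitted ++ [c] := by
          have : i + h + 1 = emitted.length + 1 := by omega
          rw [this, List.take_append]
          simp
        have hdrop : (emitted ++ c :: cs).drop (i + h + 1) = cs := by
          have : i + h + 1 = emitted.length + 1 := by omega
          rw [this, List.drop_append]
          simp
        rw [htake, hdrop]
        have hc2 : ((h : Int) + 1) = ((h + 1 : Nat) : Int) := by push_cast; ring
        have hc3 : ((i : Int) + 1) = ((i + 1 : Nat) : Int) := by push_cast; ring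
        rw [hc2, hc3]
        have hre : (emitted ++ [c]) ++ '-' :: cs = (emitted ++ [c, '-']) ++ cs := by simp
        rw [hre]
        have := ih (i + 1) (h + 1) (emitted ++ [c, '-']) cs
          (by simp; omega) (by intro _; simp; omega)
        rw [this]
        simp [hyphSpec, hb]
    · simp only [hb, Bool.false_eq_true, if_false]
      have hc3 : ((i : Int) + 1) = ((i + 1 : Nat) : Int) := by push_cast; ring
      rw [hc3]
      have hsplit : emitted ++ rest = (emitted ++ rest.take 1) ++ rest.drop 1 := by
        rw [List.append_assoc, List.take_append_drop]
      rw [hsplit]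
      have := ih (i + 1) h (emitted ++ rest.take 1) (rest.drop 1)
        (by cases rest with
            | nil => simp; omega
            | cons c cs => have := heq (by simp); simp; omega)
        (by intro hx
            cases rest with
            | nil => simp at hx
            | cons c cs => have := heq (by simp); simp; omega)
      rw [this]
      simp [hyphSpec, hb]

-- ========== B side ==========

-- the cut positions produced by B's comprehension, from enumerate offset i
def cutsOf (bits : List Int) (i : Int) : List Int :=
  (PySem.List.enumerate bits i).filterMap
    (fun ib => if ib.2 == 1 then some (ib.1 + 1) else none)

-- the segments B's loop produces, given the pending start position
def piecesFrom (s : List Char) : List Int → Int → List (List Char)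
  | [], prev => [PySem.List.slice s (some prev) none]
  | c :: cs, prev => PySem.List.slice s (some prev) (some c) :: piecesFrom s cs c

theorem piecesFrom_ne_nil (s : List Char) (cuts : List Int) (prev : Int) :
    piecesFrom s cuts prev ≠ [] := by
  cases cuts <;> simp [piecesFrom]

theorem intercalate_cons_of_ne_nil (sep x : List Char) (l : List (List Char)) (h : l ≠ []) :
    List.intercalate sep (x :: l) = x ++ sep ++ List.intercalate sep l := by
  cases l with
  | nil => exact absurd rfl h
  | cons y ys => simp [List.intercalate]

theorem B_fold (s : List Char) (cuts : List Int) : ∀ (acc : List (List Char)) (prev : Int),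
    (let st := cuts.foldl
        (fun (acc : List (List Char) × Int) c =>
          (acc.1 ++ [PySem.List.slice s (some acc.2) (some c)], c))
        (acc, prev)
     st.1 ++ [PySem.List.slice s (some st.2) none]) = acc ++ piecesFrom s cuts prev := by
  induction cuts with
  | nil => intro acc prev; simp [piecesFrom]
  | cons c cs ih =>
    intro acc prev
    simp only [List.foldl_cons]
    rw [ih]
    simp [piecesFrom]

theorem B_join (s : List Char) (bits : List Int) : ∀ (i prev : Nat), prev ≤ i →
    List.intercalate ['-'] (piecesFrom s (cutsOf bits (i : Int)) (prev : Int)) =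
      (s.drop prev).take (i - prev) ++ hyphSpec (s.drop i) bits := by
  induction bits with
  | nil =>
    intro i prev h
    simp only [cutsOf, PySem.List.enumerate, List.filterMap_nil, piecesFrom]
    rw [PySem.List.slice_from s (by positivity)]
    simp [hyphSpec, Int.toNat_natCast, take_drop_join s prev i h, List.intercalate]
  | cons b bs ih =>
    intro i prev h
    rw [cutsOf, PySem.List.enumerate_cons]
    by_cases hb : b == 1
    · simp only [List.filterMap_cons, hb, if_true]
      have hc3 : ((i : Int) + 1) = ((i + 1 : Nat) : Int) := by push_cast; ring
      rw [hc3]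
      show List.intercalate ['-']
          (piecesFrom s (((i + 1 : Nat) : Int) :: cutsOf bs ((i + 1 : Nat) : Int)) (prev : Int)) = _
      rw [piecesFrom,
        intercalate_cons_of_ne_nil _ _ _ (piecesFrom_ne_nil s _ _),
        ih (i + 1) (i + 1) (le_refl _),
        PySem.List.slice_natCast s prev (i + 1)]
      have h1 : (s.drop prev).take (i + 1 - prev) =
          (s.drop prev).take (i - prev) ++ (s.drop i).take 1 := take_split s prev i h
      simp only [h1, Nat.sub_self, List.take_zero, List.nil_append, hyphSpec, hb, if_true]
      simp
    · simp only [List.filterMap_cons, hb, Bool.false_eq_true, if_false]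
      have hc3 : ((i : Int) + 1) = ((i + 1 : Nat) : Int) := by push_cast; ring
      rw [hc3]
      show List.intercalate ['-'] (piecesFrom s (cutsOf bs ((i + 1 : Nat) : Int)) (prev : Int)) = _
      rw [ih (i + 1) prev (by omega)]
      have h1 : (s.drop prev).take (i + 1 - prev) =
          (s.drop prev).take (i - prev) ++ (s.drop i).take 1 := take_split s prev i h
      simp [h1, hyphSpec, hb]

-- ===== VERDICT (by name: the statement is the Claim_ definition above) =====
theorem insert_hyphenation_spec : Claim_equal_insert_hyphenation := by
  intro string bit_list _
  unfold Spec_insert_hyphenation insert_hyphenation insert_hyphenation_alt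
  apply congrArg String.ofList
  have hA := A_loop bit_list 0 0 [] string.toList (by simp) (by intro _; simp)
  simp only [Nat.cast_zero, List.nil_append] at hA
  rw [hA]
  have hB := B_fold string.toList (cutsOf bit_list 0) [] 0
  simp only [List.nil_append] at hB
  show hyphSpec string.toList bit_list =
    List.intercalate ['-'] _
  have h0 : (0 : Int) = ((0 : Nat) : Int) := rfl
  rw [show ((PySem.List.enumerate bit_list 0).filterMap
        (fun ib => if ib.2 == 1 then some (ib.1 + 1) else none)) = cutsOf bit_list 0 from rfl,
      hB, h0, B_join string.toList bit_list 0 0 (le_refl _)]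
  simp
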